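-- pv_equiv track=rewrite | github.com/leejuhanKr/Algorithm | 프로그래머스/1/258712. 가장 많이 받은 선물/가장 많이 받은 선물.py | solution
-- ===== SOURCE A (Python) =====
-- from collections import Counter
--
-- def solution(_friends, gifts):
--     friends = { name: Friend(name) for name in _friends }
--
--     for gift in gifts:
--         giver, givee = map(lambda name: friends[name], gift.split())
--         giver.give(givee)
--
--     for A in friends.values():
--         for B in friends.values():
--             give_num_AB, give_num_BA = A.have_given(B), B.have_given(A)
--             if (A == B): continue
--             if (give_num_AB < give_num_BA): continue
--
--             if (give_num_AB > give_num_BA):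
--                 A.shouldGet += 1
--             elif (A.index > B.index):
--                 A.shouldGet += 1
--
--     return max(f.shouldGet for f in friends.values())
--
--
--
--
--     return True
--
-- class Friend:
--     def __init__(self, name):
--         self.name = name
--         self._give_dict = Counter()
--         self._get = 0
--         self.shouldGet = 0;
--
--     def give(self, cls):
--         self._give_dict[cls.name] += 1
--         cls.get()
--
--     def get(self):
--         self._get += 1
--
--     def have_given(self, cls):
--         return self._give_dict[cls.name]
--
--     @property
--     def index(self):
--         return sum(self._give_dict.values()) - self._get
-- ===== SOURCE B (Python) =====
-- def solution(_friends, gifts):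
--     # one pass over gifts builds pair counts and net scores; points start from the
--     # sorted-score rank baseline (= pairs won by score alone) and are corrected only
--     # on the pairs that actually exchanged unequal gift counts
--     give = {}
--     score = {}
--     for g in gifts:
--         a, b = g.split()
--         give[(a, b)] = give.get((a, b), 0) + 1
--         score[a] = score.get(a, 0) + 1
--         score[b] = score.get(b, 0) - 1
--     names = list(dict.fromkeys(_friends))
--     sc = {n: score.get(n, 0) for n in names}
--     below = {}
--     for i, v in enumerate(sorted(sc.values())):
--         if v not in below:
--             below[v] = i
--     points = {n: below[sc[n]] for n in names}
--     for (a, b) in give: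
--         if a != b and give[(a, b)] > give.get((b, a), 0):
--             points[a] += 1
--             if sc[a] != sc[b]:
--                 points[a if sc[a] > sc[b] else b] -= 1
--     return max(points.values())
-- ===== Notes on version B (the rewrite author's own statement) =====
-- stated objective: alternative
-- what changed: Drops A's Friend objects and its double loop over all ordered friend pairs: B seeds each friend's points with their rank in the sorted list of net scores (the outcome of every pair decided by score alone) and then corrects points only at the gift edges actually present with unequal directed counts, so no loop over friend pairs remains.
import Mathlib
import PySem

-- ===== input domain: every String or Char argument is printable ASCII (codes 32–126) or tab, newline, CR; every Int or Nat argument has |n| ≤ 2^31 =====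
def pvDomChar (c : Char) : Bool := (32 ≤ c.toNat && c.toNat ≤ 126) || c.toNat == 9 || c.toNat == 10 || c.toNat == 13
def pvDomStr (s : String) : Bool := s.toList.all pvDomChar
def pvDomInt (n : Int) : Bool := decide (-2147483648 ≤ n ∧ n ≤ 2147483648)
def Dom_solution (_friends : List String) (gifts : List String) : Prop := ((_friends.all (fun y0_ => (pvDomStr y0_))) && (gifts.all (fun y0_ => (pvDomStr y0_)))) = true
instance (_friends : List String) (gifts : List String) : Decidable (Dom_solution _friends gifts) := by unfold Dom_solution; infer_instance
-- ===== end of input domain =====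

-- B replaces A's double loop over all friend pairs by a sorted-score rank baseline
-- corrected only at the gift edges with unequal counts (objective: alternative algorithm).

-- "giver, givee = gift.split()" of A / "a, b = g.split()" of B: the two words of a gift
-- (none = Python raises ValueError on unpacking; those inputs are outside Pre_).
def pvSplitPair (g : String) : Option (String × String) :=
  match PySem.Str.split₀ g with
  | [a, b] => some (a, b)
  | _ => none

-- ===== PORT A =====
-- Friend object of A: _give_dict (Counter), _get, shouldGet (name is the dict key).
structure PvFriend where
  give : PySem.Dict String Int
  got : Int
  should : Int
  deriving Repr, DecidableEq

def pvFriend0 : PvFriend := ⟨PySem.Dict.empty, 0, 0⟩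

-- A == B on Friend objects is object identity; the dict values carry distinct names, so it is name equality here.
def solution (_friends : List String) (gifts : List String) : Int :=
  let friends0 : PySem.Dict String PvFriend :=
    _friends.foldl (fun d name => d.insert name pvFriend0) PySem.Dict.empty
  let friends1 : PySem.Dict String PvFriend :=
    gifts.foldl (fun d gift =>
      (pvSplitPair gift).elim d (fun pr =>
        -- giver.give(givee): give_dict[givee.name] += 1; givee._get += 1
        let gn := pr.1
        let en := pr.2
        let gv := d.getD gn pvFriend0
        let d1 := d.insert gn { gv with give := gv.give.modify en 0 (· + 1) }
        let ge := d1.getD en pvFriend0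
        d1.insert en { ge with got := ge.got + 1 })) friends0
  let ks := friends1.keys
  let friends2 : PySem.Dict String PvFriend :=
    ks.foldl (fun d an =>
      ks.foldl (fun d bn =>
        let fA := d.getD an pvFriend0
        let fB := d.getD bn pvFriend0
        let gAB := fA.give.getD bn 0
        let gBA := fB.give.getD an 0
        if an == bn then d
        else if gAB < gBA then d
        else if gAB > gBA then d.insert an { fA with should := fA.should + 1 }
        else if fA.give.values.sum - fA.got > fB.give.values.sum - fB.got then
          d.insert an { fA with should := fA.should + 1 }
        else d) d) friends1
  -- max(...) raises on an empty sequence in Python: outside Pre_, 0 here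
  (PySem.List.max? (friends2.values.map (·.should)) (fun x => x)).getD 0

-- ===== PORT B =====
def solution_alt (_friends : List String) (gifts : List String) : Int :=
  let gs : PySem.Dict (String × String) Int × PySem.Dict String Int :=
    gifts.foldl (fun p g =>
      (pvSplitPair g).elim p (fun pr =>
        let a := pr.1
        let b := pr.2
        let s1 := p.2.insert a (p.2.getD a 0 + 1)
        (p.1.insert (a, b) (p.1.getD (a, b) 0 + 1),
         s1.insert b (s1.getD b 0 - 1)))) (PySem.Dict.empty, PySem.Dict.empty)
  let give := gs.1
  let score := gs.2
  let names := PySem.List.dedup _friends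
  let sc : PySem.Dict String Int :=
    names.foldl (fun d n => d.insert n (score.getD n 0)) PySem.Dict.empty
  let below : PySem.Dict Int Int :=
    (PySem.List.enumerate (PySem.List.sorted sc.values (fun x => x) false) 0).foldl
      (fun d iv => if d.contains iv.2 then d else d.insert iv.2 iv.1) PySem.Dict.empty
  -- below[sc[n]]: sc[n] occurs in sorted(sc.values()), so the key is always present (getD is exact)
  let points0 : PySem.Dict String Int :=
    names.foldl (fun d n => d.insert n (below.getD (sc.getD n 0) 0)) PySem.Dict.empty
  -- points[a] / sc[a]: gift endpoints are friends under Pre_, so the keys are present (getD is exact)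
  let points :=
    give.keys.foldl (fun d ab =>
      if ab.1 != ab.2 && decide (give.getD ab 0 > give.getD (ab.2, ab.1) 0) then
        let d1 := d.insert ab.1 (d.getD ab.1 0 + 1)
        if sc.getD ab.1 0 != sc.getD ab.2 0 then
          let w := if sc.getD ab.1 0 > sc.getD ab.2 0 then ab.1 else ab.2
          d1.insert w (d1.getD w 0 - 1)
        else d1
      else d) points0
  -- max(...) raises on an empty sequence in Python: outside Pre_, 0 here
  (PySem.List.max? points.values (fun x => x)).getD 0

-- ===== PRECONDITION & SPEC =====
-- Pre_ excludes exactly the inputs where A raises: empty friends (ValueError from max()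
-- on an empty sequence) and any gift that does not split into exactly two names both
-- present in _friends (ValueError from unpacking / KeyError on the dict lookup).
def Pre_solution (_friends : List String) (gifts : List String) : Prop :=
  _friends ≠ [] ∧
  ∀ g ∈ gifts, ∃ p, pvSplitPair g = some p ∧ p.1 ∈ _friends ∧ p.2 ∈ _friends

instance (_friends : List String) (gifts : List String) : Decidable (Pre_solution _friends gifts) := by
  unfold Pre_solution
  have : ∀ g : String, Decidable (∃ p, pvSplitPair g = some p ∧ p.1 ∈ _friends ∧ p.2 ∈ _friends) := by
    intro g
    cases h : pvSplitPair g with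
    | none => exact isFalse (by rintro ⟨p, hp, -⟩; cases hp)
    | some q =>
      refine decidable_of_iff (q.1 ∈ _friends ∧ q.2 ∈ _friends) ?_
      constructor
      · rintro ⟨h1, h2⟩; exact ⟨q, rfl, h1, h2⟩
      · rintro ⟨p, hp, h1, h2⟩; cases hp; exact ⟨h1, h2⟩
  exact instDecidableAnd

def pvWitness_solution : List String × List String := (["a", "b"], ["a b", "b a", "a b"])

def Spec_solution (_friends : List String) (gifts : List String) (out : Int) : Prop := out = solution_alt _friends gifts
instance (_friends : List String) (gifts : List String) (out : Int) : Decidable (Spec_solution _friends gifts out) := by unfold Spec_solution; infer_instance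

-- ===== CLAIM (what is proved, stated in full; the proofs are below) =====
def Claim_equal_solution : Prop := ∀ (_friends : List String) (gifts : List String), Dom_solution _friends gifts → Pre_solution _friends gifts → Spec_solution _friends gifts (solution _friends gifts)

-- ===== LEMMAS AND PROOFS =====

-- The parsed gift list and the counting functions both ports compute.
def pvPairs (gifts : List String) : List (String × String) := gifts.filterMap pvSplitPair

def pvG (P : List (String × String)) (a b : String) : Int := (P.count (a, b) : Int)
def pvIdx (P : List (String × String)) (a : String) : Int :=
  (P.countP (fun p => p.1 == a) : Int) - (P.countP (fun p => p.2 == a) : Int)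
def pvWin (P : List (String × String)) (a b : String) : Bool :=
  decide (pvG P a b > pvG P b a) || ((pvG P a b == pvG P b a) && decide (pvIdx P a > pvIdx P b))
def pvF (P : List (String × String)) (L : List String) (x : String) : Int :=
  (L.countP (fun y => y != x && pvWin P x y) : Int)
def pvAns (P : List (String × String)) (L : List String) : Int :=
  (PySem.List.max? (L.map (pvF P L)) (fun x => x)).getD 0

-- fold of key-determined inserts: lookups
theorem pvFunFold_getD {ν : Type} (f : String → ν) (dflt : ν) :
    ∀ (fr : List String) (d : PySem.Dict String ν) (x : String),
      (fr.foldl (fun d n => d.insert n (f n)) d).getD x dflt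
        = if x ∈ fr then f x else d.getD x dflt := by
  intro fr
  induction fr with
  | nil => intro d x; simp
  | cons n t ih =>
    intro d x
    simp only [List.foldl_cons, ih, PySem.Dict.getD_insert, List.mem_cons]
    by_cases h1 : x ∈ t <;> by_cases h2 : x = n <;> simp [h1, h2]

theorem pvSum_ite_nodup (k : String) (g : String → Int) (v : Int) :
    ∀ (L : List String), L.Nodup → k ∈ L →
    (L.map (fun j => if j == k then v else g j)).sum = (L.map g).sum + v - g k := by
  intro L
  induction L with
  | nil => intro _ hk; cases hk
  | cons j t ih =>
    intro hnd hk
    rcases List.nodup_cons.1 hnd with ⟨hj, hnd'⟩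
    by_cases h : j = k
    · have hcong : ∀ y ∈ t, (fun j => if j == k then v else g j) y = g y := by
        intro y hy
        have hne : y ≠ k := fun e => hj ((h.trans e.symm) ▸ hy)
        simp [hne]
      simp only [List.map_cons, List.sum_cons, List.map_congr_left hcong, h,
        beq_self_eq_true, if_true]
      ring
    · have hk' : k ∈ t := by
        rcases List.mem_cons.1 hk with h' | h'
        · exact absurd h'.symm h
        · exact h'
      have hb : (j == k) = false := by simp [h]
      simp only [List.map_cons, List.sum_cons, ih hnd' hk', hb, Bool.false_eq_true, if_false]
      ring

theorem pvSum_values_insert (d : PySem.Dict String Int) (k : String) (v : Int)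
    (hnd : d.keys.Nodup) :
    (d.insert k v).values.sum = d.values.sum + v - d.getD k 0 := by
  by_cases hc : d.contains k = true
  · have hkmem : k ∈ d.keys := (PySem.Dict.contains_iff_mem_keys d k).1 hc
    have hitems := PySem.Dict.items_eq_map_keys d hnd (0 : Int)
    have h1 := PySem.Dict.items_insert_of_contains d v hc
    have hval : (d.insert k v).values = (d.insert k v).items.map (·.2) := rfl
    have hval' : d.values = d.items.map (·.2) := rfl
    rw [hval, h1, hitems, hval', hitems]
    simp only [List.map_map]
    have hfun : ∀ j ∈ d.keys,
        ((fun p : String × Int => p.2) ∘ (fun p => if p.1 == k then (k, v) else p) ∘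
          (fun j => (j, d.getD j 0))) j = (fun j => if j == k then v else d.getD j 0) j := by
      intro j _; by_cases h : j = k <;> simp [h]
    rw [List.map_congr_left hfun, pvSum_ite_nodup k (fun j => d.getD j 0) v d.keys hnd hkmem]
    simp [Function.comp_def]
  · have hc' : d.contains k = false := by revert hc; cases d.contains k <;> simp
    have h1 := PySem.Dict.items_insert_of_not_contains d v hc'
    have hg : d.getD k 0 = (0 : Int) := PySem.Dict.getD_of_not_contains d 0 hc'
    have hval : (d.insert k v).values = (d.insert k v).items.map (·.2) := rfl
    rw [hval, h1, hg]
    have hval' : d.values = d.items.map (·.2) := rfl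
    rw [hval']
    simp

theorem pvSum_values_modify (d : PySem.Dict String Int) (k : String)
    (hnd : d.keys.Nodup) :
    (d.modify k 0 (· + 1)).values.sum = d.values.sum + 1 := by
  have hmod : d.modify k 0 (· + 1) = d.insert k (d.getD k 0 + 1) := rfl
  rw [hmod, pvSum_values_insert d k _ hnd]
  ring

-- ===== B-side lemmas =====

def pvStepGive (d : PySem.Dict (String × String) Int) (pr : String × String) :
    PySem.Dict (String × String) Int := d.insert pr (d.getD pr 0 + 1)

def pvStepScore (d : PySem.Dict String Int) (pr : String × String) : PySem.Dict String Int :=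
  let s1 := d.insert pr.1 (d.getD pr.1 0 + 1)
  s1.insert pr.2 (s1.getD pr.2 0 - 1)

theorem pvB1 : ∀ (gifts : List String)
    (p : PySem.Dict (String × String) Int × PySem.Dict String Int),
    gifts.foldl (fun p g => (pvSplitPair g).elim p (fun pr =>
        let a := pr.1
        let b := pr.2
        let s1 := p.2.insert a (p.2.getD a 0 + 1)
        (p.1.insert (a, b) (p.1.getD (a, b) 0 + 1),
         s1.insert b (s1.getD b 0 - 1)))) p
      = ((pvPairs gifts).foldl pvStepGive p.1, (pvPairs gifts).foldl pvStepScore p.2) := by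
  intro gifts
  induction gifts with
  | nil => intro p; rfl
  | cons g t ih =>
    intro p
    cases h : pvSplitPair g with
    | none =>
      have hp : pvPairs (g :: t) = pvPairs t := by
        simp [pvPairs, h]
      rw [hp]
      simp only [List.foldl_cons, h, Option.elim_none]
      exact ih p
    | some pr =>
      have hp : pvPairs (g :: t) = pr :: pvPairs t := by
        simp [pvPairs, h]
      rw [hp]
      simp only [List.foldl_cons, h, Option.elim_some]
      exact ih _

theorem pvScore_getD : ∀ (P : List (String × String)) (d : PySem.Dict String Int) (x : String),
    (P.foldl pvStepScore d).getD x 0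
      = d.getD x 0 + (P.countP (fun p => p.1 == x) : Int) - (P.countP (fun p => p.2 == x) : Int) := by
  intro P
  induction P with
  | nil => intro d x; simp
  | cons pr t ih =>
    intro d x
    simp only [List.foldl_cons, ih, List.countP_cons]
    unfold pvStepScore
    simp only [PySem.Dict.getD_insert]
    have e1 : ((pr.1 == x : Bool)) = decide (x = pr.1) := by
      by_cases h : x = pr.1
      · simp [h]
      · simp only [decide_eq_false h, beq_eq_false_iff_ne, ne_eq]
        exact fun e => h e.symm
    have e2 : ((pr.2 == x : Bool)) = decide (x = pr.2) := by
      by_cases h : x = pr.2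
      · simp [h]
      · simp only [decide_eq_false h, beq_eq_false_iff_ne, ne_eq]
        exact fun e => h e.symm
    rw [e1, e2]
    by_cases h2 : x = pr.2 <;> by_cases h1 : x = pr.1
    · have h3 : pr.1 = pr.2 := h1.symm.trans h2
      subst h1
      simp [h3]; omega
    · have h3 : ¬ pr.2 = pr.1 := fun e => h1 (h2.trans e)
      subst h2
      simp [h3]; omega
    · subst h1
      have h3 : ¬ pr.1 = pr.2 := h2
      simp [h3]; omega
    · simp [h1, h2]

def pvScoreD (P : List (String × String)) : PySem.Dict String Int :=
  P.foldl pvStepScore PySem.Dict.empty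

theorem pvScoreD_getD (P : List (String × String)) (x : String) :
    (pvScoreD P).getD x 0 = pvIdx P x := by
  unfold pvScoreD pvIdx
  rw [pvScore_getD]
  simp

theorem pvGive_eq_counter (P : List (String × String)) :
    P.foldl pvStepGive PySem.Dict.empty = PySem.Dict.counter P := rfl

-- the "first index of each value" loop of B
def pvBStep (d : PySem.Dict Int Int) (iv : Int × Int) : PySem.Dict Int Int :=
  if d.contains iv.2 then d else d.insert iv.2 iv.1

theorem pvBelow_pres : ∀ (l : List Int) (s : Int) (d : PySem.Dict Int Int) (v : Int),
    d.contains v = true →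
    ((PySem.List.enumerate l s).foldl pvBStep d).getD v 0 = d.getD v 0 := by
  intro l
  induction l with
  | nil => intro s d v _; simp [PySem.List.enumerate_nil]
  | cons h t ih =>
    intro s d v hv
    rw [PySem.List.enumerate_cons, List.foldl_cons]
    show ((PySem.List.enumerate t (s + 1)).foldl pvBStep (pvBStep d (s, h))).getD v 0 = d.getD v 0
    by_cases hc : d.contains h = true
    · rw [show pvBStep d (s, h) = d from by simp [pvBStep, hc]]
      exact ih (s + 1) d v hv
    · have hc' : d.contains h = false := by revert hc; cases d.contains h <;> simp
      have hne : h ≠ v := fun e => by rw [e] at hc'; rw [hv] at hc'; cases hc'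
      have hv' : (d.insert h s).contains v = true := by
        rw [PySem.Dict.contains_insert, hv]; simp
      rw [show pvBStep d (s, h) = d.insert h s from by simp [pvBStep, hc']]
      rw [ih (s + 1) _ v hv', PySem.Dict.getD_insert, if_neg (fun e => hne e.symm)]

theorem pvBelow_getD : ∀ (l : List Int), l.Pairwise (· ≤ ·) →
    ∀ (s : Int) (d : PySem.Dict Int Int) (v : Int), d.contains v = false → v ∈ l →
    ((PySem.List.enumerate l s).foldl pvBStep d).getD v 0
      = s + (l.countP (fun w => decide (w < v)) : Int) := by
  intro l
  induction l with
  | nil => intro _ s d v _ hv; cases hv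
  | cons h t ih =>
    intro hp s d v hv hvl
    rcases List.pairwise_cons.1 hp with ⟨hle, hp'⟩
    rw [PySem.List.enumerate_cons, List.foldl_cons]
    show ((PySem.List.enumerate t (s + 1)).foldl pvBStep (pvBStep d (s, h))).getD v 0 = _
    by_cases hvh : v = h
    · subst hvh
      rw [show pvBStep d (s, v) = d.insert v s from by simp [pvBStep, hv]]
      have hcv : (d.insert v s).contains v = true := PySem.Dict.contains_insert_self d v s
      rw [pvBelow_pres t (s + 1) _ v hcv, PySem.Dict.getD_insert_self]
      have hz : t.countP (fun w => decide (w < v)) = 0 := by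
        rw [List.countP_eq_zero]
        intro w hw
        have := hle w hw
        simp only [decide_eq_true_eq]
        omega
      rw [List.countP_cons, hz]
      simp
    · have hvt : v ∈ t := by
        rcases List.mem_cons.1 hvl with h' | h'
        · exact absurd h' hvh
        · exact h'
      have hlt : h < v := lt_of_le_of_ne (hle v hvt) (fun e => hvh e.symm)
      have hcnt : ((h :: t).countP (fun w => decide (w < v)) : Int)
          = 1 + (t.countP (fun w => decide (w < v)) : Int) := by
        rw [List.countP_cons]
        simp only [decide_eq_true_eq]
        rw [if_pos hlt]
        push_cast
        ring
      rw [hcnt]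
      by_cases hc : d.contains h = true
      · rw [show pvBStep d (s, h) = d from by simp [pvBStep, hc]]
        rw [ih hp' (s + 1) d v hv hvt]
        ring
      · have hc' : d.contains h = false := by revert hc; cases d.contains h <;> simp
        have hv' : (d.insert h s).contains v = false := by
          rw [PySem.Dict.contains_insert, hv]
          simp only [Bool.or_false]
          simp [hvh]
        rw [show pvBStep d (s, h) = d.insert h s from by simp [pvBStep, hc']]
        rw [ih hp' (s + 1) _ v hv' hvt]
        ring

-- the correction step of B, with the two dicts already evaluated
def pvCStep (P : List (String × String)) (d : PySem.Dict String Int) (ab : String × String) :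
    PySem.Dict String Int :=
  if ab.1 != ab.2 && decide (pvG P ab.1 ab.2 > pvG P ab.2 ab.1) then
    let d1 := d.insert ab.1 (d.getD ab.1 0 + 1)
    if pvIdx P ab.1 != pvIdx P ab.2 then
      let w := if pvIdx P ab.1 > pvIdx P ab.2 then ab.1 else ab.2
      d1.insert w (d1.getD w 0 - 1)
    else d1
  else d

def pvPA (P : List (String × String)) (x : String) (ab : String × String) : Bool :=
  (ab.1 != ab.2) && decide (pvG P ab.1 ab.2 > pvG P ab.2 ab.1) && (ab.1 == x)

def pvPB (P : List (String × String)) (x : String) (ab : String × String) : Bool :=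
  (ab.1 != ab.2) && decide (pvG P ab.1 ab.2 > pvG P ab.2 ab.1) &&
  (pvIdx P ab.1 != pvIdx P ab.2) && ((if pvIdx P ab.1 > pvIdx P ab.2 then ab.1 else ab.2) == x)

def pvDelta (P : List (String × String)) (x : String) (ab : String × String) : Int :=
  (if pvPA P x ab then 1 else 0) - (if pvPB P x ab then 1 else 0)

theorem pvCStep_getD (P : List (String × String)) (d : PySem.Dict String Int)
    (ab : String × String) (x : String) :
    (pvCStep P d ab).getD x 0 = d.getD x 0 + pvDelta P x ab := by
  obtain ⟨a, b⟩ := ab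
  unfold pvCStep pvDelta pvPA pvPB
  by_cases hg : ((a, b).1 != (a, b).2 && decide (pvG P (a, b).1 (a, b).2 > pvG P (a, b).2 (a, b).1)) = true
  · have hab : ¬ a = b := by
      have h1 := (Bool.and_eq_true_iff.1 hg).1
      exact bne_iff_ne.1 h1
    simp only [hg, Bool.true_and, if_true]
    by_cases hsc : (pvIdx P (a, b).1 != pvIdx P (a, b).2) = true
    · simp only [hsc, Bool.true_and, if_true]
      by_cases hgt : pvIdx P (a, b).1 > pvIdx P (a, b).2
      · rw [if_pos hgt]
        by_cases hxa : x = a <;> by_cases hxb : x = b <;>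
          simp_all [PySem.Dict.getD_insert] <;> (try split_ifs) <;> (try simp_all) <;> (try omega)
      · rw [if_neg hgt]
        by_cases hxa : x = a <;> by_cases hxb : x = b <;>
          simp_all [PySem.Dict.getD_insert] <;> (try split_ifs) <;> (try simp_all) <;> (try omega)
    · have hsc' : (pvIdx P (a, b).1 != pvIdx P (a, b).2) = false := by
        revert hsc; cases (pvIdx P (a, b).1 != pvIdx P (a, b).2) <;> simp
      simp only [hsc', Bool.false_and, Bool.false_eq_true, if_false]
      by_cases hxa : x = a <;> simp_all [PySem.Dict.getD_insert] <;> (try split_ifs) <;>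
        (try simp_all) <;> (try omega) <;> exact fun e => hxa e.symm
  · have hg' : ((a, b).1 != (a, b).2 && decide (pvG P (a, b).1 (a, b).2 > pvG P (a, b).2 (a, b).1)) = false := by
      revert hg
      cases ((a, b).1 != (a, b).2 && decide (pvG P (a, b).1 (a, b).2 > pvG P (a, b).2 (a, b).1)) <;> simp
    simp only [hg', Bool.false_and, Bool.false_eq_true, if_false]
    simp

theorem pvCStep_keys (P : List (String × String)) (d : PySem.Dict String Int)
    (ab : String × String) (h1 : ab.1 ∈ d.keys) (h2 : ab.2 ∈ d.keys) :
    (pvCStep P d ab).keys = d.keys := by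
  have hc1 : d.contains ab.1 = true := (PySem.Dict.contains_iff_mem_keys d ab.1).2 h1
  have hk1 : (d.insert ab.1 (d.getD ab.1 0 + 1)).keys = d.keys :=
    PySem.Dict.keys_insert_of_contains d _ hc1
  have hcw : ∀ w, w ∈ d.keys → (d.insert ab.1 (d.getD ab.1 0 + 1)).contains w = true := by
    intro w hw
    rw [PySem.Dict.contains_iff_mem_keys, hk1]
    exact hw
  simp only [pvCStep]
  split_ifs with hp hs hgt
  · rw [PySem.Dict.keys_insert_of_contains _ _ (hcw ab.1 h1), hk1]
  · rw [PySem.Dict.keys_insert_of_contains _ _ (hcw ab.2 h2), hk1]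
  · exact hk1
  · rfl

theorem pvCFold (P : List (String × String)) :
    ∀ (E : List (String × String)) (d : PySem.Dict String Int),
    (∀ ab ∈ E, ab.1 ∈ d.keys ∧ ab.2 ∈ d.keys) →
    ((E.foldl (pvCStep P) d).keys = d.keys ∧
     ∀ x, (E.foldl (pvCStep P) d).getD x 0 = d.getD x 0 + (E.map (pvDelta P x)).sum) := by
  intro E
  induction E with
  | nil => intro d _; exact ⟨rfl, fun x => by simp⟩
  | cons ab t ih =>
    intro d hmem
    have hab := hmem ab (List.mem_cons_self ..)
    have hk1 : (pvCStep P d ab).keys = d.keys := pvCStep_keys P d ab hab.1 hab.2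
    have hmem' : ∀ p ∈ t, p.1 ∈ (pvCStep P d ab).keys ∧ p.2 ∈ (pvCStep P d ab).keys := by
      intro p hp; rw [hk1]; exact hmem p (List.mem_cons_of_mem _ hp)
    obtain ⟨ik, iv⟩ := ih (pvCStep P d ab) hmem'
    rw [List.foldl_cons]
    refine ⟨ik.trans hk1, fun x => ?_⟩
    rw [iv x, pvCStep_getD, List.map_cons, List.sum_cons]
    ring

theorem pvDeltaSum (P : List (String × String)) (x : String) :
    ∀ (E : List (String × String)),
    (E.map (pvDelta P x)).sum = (E.countP (pvPA P x) : Int) - (E.countP (pvPB P x) : Int) := by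
  intro E
  induction E with
  | nil => simp
  | cons ab t ih =>
    rw [List.map_cons, List.sum_cons, ih, List.countP_cons, List.countP_cons]
    unfold pvDelta
    by_cases hA : pvPA P x ab = true <;> by_cases hB : pvPB P x ab = true <;>
      simp [hA, hB] <;> push_cast <;> ring

-- the per-element count identity behind the rank baseline:
-- wins = score-baseline + gift-count wins − (unequal-count pairs the score would have given x)
theorem pvCountSplit (P : List (String × String)) (x : String) :
    ∀ (l : List String),
    l.countP (fun y => y != x && pvWin P x y)
      + l.countP (fun y => (y != x) && decide (pvG P x y ≠ pvG P y x) && decide (pvIdx P y < pvIdx P x))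
    = l.countP (fun y => decide (pvIdx P y < pvIdx P x))
      + l.countP (fun y => (y != x) && decide (pvG P x y > pvG P y x)) := by
  intro l
  unfold pvWin
  induction l with
  | nil => simp
  | cons y t ih =>
    simp only [List.countP_cons]
    by_cases hxy : y = x
    · subst hxy
      simp only [bne_self_eq_false, Bool.false_and]
      have : ¬ pvIdx P y < pvIdx P y := lt_irrefl _
      simp only [this, decide_false, if_false, Bool.false_eq_true]
      omega
    · have hb : (y != x) = true := bne_iff_ne.2 hxy
      simp only [hb, Bool.true_and]
      by_cases hgt : pvG P x y > pvG P y x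
      · have h1 : decide (pvG P x y > pvG P y x) = true := decide_eq_true hgt
        have h2 : decide (pvG P x y ≠ pvG P y x) = true := decide_eq_true (by omega)
        simp only [h1, h2, Bool.true_or, Bool.true_and, if_true]
        omega
      · have h1 : decide (pvG P x y > pvG P y x) = false := decide_eq_false (by omega)
        by_cases heq : pvG P x y = pvG P y x
        · have h2 : decide (pvG P x y ≠ pvG P y x) = false := decide_eq_false (by simp [heq])
          have h3 : (pvG P x y == pvG P y x) = true := by simp [heq]
          have h4 : (decide (pvG P x y > pvG P y x) || ((pvG P x y == pvG P y x) && decide (pvIdx P x > pvIdx P y))) = decide (pvIdx P y < pvIdx P x) := by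
            rw [h1, h3]
            simp only [Bool.false_or, Bool.true_and]
          rw [h4, h2, h1]
          simp only [Bool.false_and, Bool.false_eq_true, if_false]
          omega
        · have h2 : decide (pvG P x y ≠ pvG P y x) = true := decide_eq_true heq
          have h3 : (pvG P x y == pvG P y x) = false := by simp [heq]
          rw [h1, h3]
          simp only [Bool.false_or, Bool.false_and, Bool.false_eq_true, if_false, h2,
            Bool.true_and]
          by_cases hi : pvIdx P y < pvIdx P x
          · simp only [decide_eq_true hi, if_true]
            omega
          · simp only [decide_eq_false hi, Bool.false_eq_true, if_false]
            omega

-- unfolding the conjunction inside pvPA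
theorem pvPA_iff (P : List (String × String)) (x : String) (p : String × String) :
    pvPA P x p = true ↔ p.1 = x ∧ p.1 ≠ p.2 ∧ pvG P p.1 p.2 > pvG P p.2 p.1 := by
  unfold pvPA
  constructor
  · intro h
    rcases Bool.and_eq_true_iff.1 h with ⟨h12, h3⟩
    rcases Bool.and_eq_true_iff.1 h12 with ⟨h1, h2⟩
    exact ⟨beq_iff_eq.1 h3, bne_iff_ne.1 h1, of_decide_eq_true h2⟩
  · rintro ⟨h3, h1, h2⟩
    rw [Bool.and_eq_true_iff, Bool.and_eq_true_iff]
    exact ⟨⟨bne_iff_ne.2 h1, decide_eq_true h2⟩, beq_iff_eq.2 h3⟩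

theorem pvPB_iff (P : List (String × String)) (x : String) (p : String × String) :
    pvPB P x p = true ↔ p.1 ≠ p.2 ∧ pvG P p.1 p.2 > pvG P p.2 p.1 ∧
      pvIdx P p.1 ≠ pvIdx P p.2 ∧ (if pvIdx P p.1 > pvIdx P p.2 then p.1 else p.2) = x := by
  unfold pvPB
  constructor
  · intro h
    rcases Bool.and_eq_true_iff.1 h with ⟨h123, h4⟩
    rcases Bool.and_eq_true_iff.1 h123 with ⟨h12, h3⟩
    rcases Bool.and_eq_true_iff.1 h12 with ⟨h1, h2⟩
    exact ⟨bne_iff_ne.1 h1, of_decide_eq_true h2, bne_iff_ne.1 h3, beq_iff_eq.1 h4⟩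
  · rintro ⟨h1, h2, h3, h4⟩
    rw [Bool.and_eq_true_iff, Bool.and_eq_true_iff, Bool.and_eq_true_iff]
    exact ⟨⟨⟨bne_iff_ne.2 h1, decide_eq_true h2⟩, bne_iff_ne.2 h3⟩, beq_iff_eq.2 h4⟩

theorem pvG_nonneg (P : List (String × String)) (a b : String) : 0 ≤ pvG P a b := by
  unfold pvG; positivity

theorem pvG_pos_mem (P : List (String × String)) (a b : String) (h : 0 < pvG P a b) :
    (a, b) ∈ P := by
  unfold pvG at h
  have : 0 < P.count (a, b) := by omega
  exact List.count_pos_iff.1 this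

-- counting the gift-count wins of x over the edge list instead of over the friends
theorem pvCountA (P : List (String × String)) (L : List String) (E : List (String × String))
    (hE : ∀ p : String × String, p ∈ E ↔ p ∈ P) (hEnd : E.Nodup) (hL : L.Nodup)
    (hend : ∀ p ∈ P, p.1 ∈ L ∧ p.2 ∈ L) (x : String) :
    E.countP (pvPA P x) = L.countP (fun y => (y != x) && decide (pvG P x y > pvG P y x)) := by
  have hfil : ∀ p ∈ E.filter (pvPA P x),
      p.1 = x ∧ p.2 ≠ x ∧ pvG P x p.2 > pvG P p.2 x ∧ p ∈ E := by
    intro p hp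
    rcases List.mem_filter.1 hp with ⟨hpe, hpa⟩
    obtain ⟨h1, h2, h3⟩ := (pvPA_iff P x p).1 hpa
    refine ⟨h1, fun e => h2 (h1.trans e.symm), ?_, hpe⟩
    rw [h1] at h3
    exact h3
  have hMnd : ((E.filter (pvPA P x)).map (·.2)).Nodup := by
    apply List.Nodup.map_on ?_ (hEnd.filter _)
    intro p hp q hq h22
    have h1 := (hfil p hp).1
    have h2 := (hfil q hq).1
    exact Prod.ext (h1.trans h2.symm) h22
  have hmemM : ∀ y, y ∈ (E.filter (pvPA P x)).map (·.2) ↔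
      y ∈ L.filter (fun y => (y != x) && decide (pvG P x y > pvG P y x)) := by
    intro y
    constructor
    · intro hy
      rcases List.mem_map.1 hy with ⟨p, hp, hp2⟩
      obtain ⟨h1, h2, h3, hpe⟩ := hfil p hp
      have hpP : p ∈ P := (hE p).1 hpe
      have hyL : y ∈ L := hp2 ▸ (hend p hpP).2
      refine List.mem_filter.2 ⟨hyL, ?_⟩
      subst hp2
      rw [Bool.and_eq_true_iff]
      exact ⟨bne_iff_ne.2 h2, decide_eq_true h3⟩
    · intro hy
      rcases List.mem_filter.1 hy with ⟨hyL, hq⟩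
      rcases Bool.and_eq_true_iff.1 hq with ⟨hq1, hq2⟩
      have hyx : y ≠ x := bne_iff_ne.1 hq1
      have hg : pvG P x y > pvG P y x := of_decide_eq_true hq2
      have hpos : 0 < pvG P x y := lt_of_le_of_lt (pvG_nonneg P y x) hg
      have hmemE : (x, y) ∈ E := (hE _).2 (pvG_pos_mem P x y hpos)
      refine List.mem_map.2 ⟨(x, y), List.mem_filter.2 ⟨hmemE, ?_⟩, rfl⟩
      exact (pvPA_iff P x (x, y)).2 ⟨rfl, fun e => hyx e.symm, hg⟩
  have hperm := (List.perm_ext_iff_of_nodup hMnd (hL.filter _)).2 hmemM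
  rw [List.countP_eq_length_filter, List.countP_eq_length_filter]
  rw [← List.length_map (f := (·.2)) (as := E.filter (pvPA P x))]
  exact hperm.length_eq

-- the other endpoint of an edge containing x
theorem pvCountB (P : List (String × String)) (L : List String) (E : List (String × String))
    (hE : ∀ p : String × String, p ∈ E ↔ p ∈ P) (hEnd : E.Nodup) (hL : L.Nodup)
    (hend : ∀ p ∈ P, p.1 ∈ L ∧ p.2 ∈ L) (x : String) :
    E.countP (pvPB P x)
      = L.countP (fun y => (y != x) && decide (pvG P x y ≠ pvG P y x) && decide (pvIdx P y < pvIdx P x)) := by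
  set φ : String × String → String := fun p => if p.1 = x then p.2 else p.1 with hφ
  have hshape : ∀ p ∈ E.filter (pvPB P x),
      (p = (x, φ p) ∧ pvIdx P (φ p) < pvIdx P x ∧ pvG P x (φ p) > pvG P (φ p) x ∧ φ p ≠ x)
      ∨ (p = (φ p, x) ∧ pvIdx P (φ p) < pvIdx P x ∧ pvG P (φ p) x > pvG P x (φ p) ∧ φ p ≠ x) := by
    intro p hp
    rcases List.mem_filter.1 hp with ⟨hpe, hpb⟩
    obtain ⟨h1, h2, h3, h4⟩ := (pvPB_iff P x p).1 hpb
    by_cases hgt : pvIdx P p.1 > pvIdx P p.2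
    · rw [if_pos hgt] at h4
      have hφp : φ p = p.2 := by rw [hφ]; simp [h4]
      left
      refine ⟨?_, ?_, ?_, ?_⟩
      · rw [hφp, ← h4]
      · rw [hφp, ← h4]; exact hgt
      · rw [hφp, ← h4]; exact h2
      · rw [hφp, ← h4]; exact fun e => h1 e.symm
    · rw [if_neg hgt] at h4
      have hne1 : p.1 ≠ x := fun e => h1 (e.trans h4.symm)
      have hφp : φ p = p.1 := by rw [hφ]; simp [hne1]
      right
      refine ⟨?_, ?_, ?_, ?_⟩
      · rw [hφp, ← h4]
      · rw [hφp, ← h4]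
        omega
      · rw [hφp, ← h4]; exact h2
      · rw [hφp, ← h4]; exact h1
  have hMnd : ((E.filter (pvPB P x)).map φ).Nodup := by
    apply List.Nodup.map_on ?_ (hEnd.filter _)
    intro p hp q hq hpq
    rcases hshape p hp with ⟨hpe, _, hpg, _⟩ | ⟨hpe, _, hpg, _⟩ <;>
      rcases hshape q hq with ⟨hqe, _, hqg, _⟩ | ⟨hqe, _, hqg, _⟩
    · rw [hpe, hqe, hpq]
    · rw [hpq] at hpg
      exact absurd hqg (by omega)
    · rw [hpq] at hpg
      exact absurd hqg (by omega)
    · rw [hpe, hqe, hpq]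
  have hmemM : ∀ y, y ∈ (E.filter (pvPB P x)).map φ ↔
      y ∈ L.filter (fun y => (y != x) && decide (pvG P x y ≠ pvG P y x) && decide (pvIdx P y < pvIdx P x)) := by
    intro y
    constructor
    · intro hy
      rcases List.mem_map.1 hy with ⟨p, hp, hpy⟩
      have hpe : p ∈ E := (List.mem_filter.1 hp).1
      have hpP : p ∈ P := (hE p).1 hpe
      rcases hshape p hp with ⟨he, hi, hg, hx⟩ | ⟨he, hi, hg, hx⟩
      · have hyL : y ∈ L := by
          have := (hend p hpP).2
          rw [he] at this
          rw [← hpy]; exact this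
        refine List.mem_filter.2 ⟨hyL, ?_⟩
        rw [Bool.and_eq_true_iff, Bool.and_eq_true_iff, ← hpy]
        exact ⟨⟨bne_iff_ne.2 hx, decide_eq_true (by omega)⟩, decide_eq_true hi⟩
      · have hyL : y ∈ L := by
          have := (hend p hpP).1
          rw [he] at this
          rw [← hpy]; exact this
        refine List.mem_filter.2 ⟨hyL, ?_⟩
        rw [Bool.and_eq_true_iff, Bool.and_eq_true_iff, ← hpy]
        exact ⟨⟨bne_iff_ne.2 hx, decide_eq_true (by omega)⟩, decide_eq_true hi⟩
    · intro hy
      rcases List.mem_filter.1 hy with ⟨hyL, hq⟩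
      rcases Bool.and_eq_true_iff.1 hq with ⟨hq12, hq3⟩
      rcases Bool.and_eq_true_iff.1 hq12 with ⟨hq1, hq2⟩
      have hyx : y ≠ x := bne_iff_ne.1 hq1
      have hgne : pvG P x y ≠ pvG P y x := of_decide_eq_true hq2
      have hidx : pvIdx P y < pvIdx P x := of_decide_eq_true hq3
      by_cases hgw : pvG P x y > pvG P y x
      · have hmemE : (x, y) ∈ E :=
          (hE _).2 (pvG_pos_mem P x y (lt_of_le_of_lt (pvG_nonneg P y x) hgw))
        refine List.mem_map.2 ⟨(x, y), List.mem_filter.2 ⟨hmemE, ?_⟩, by rw [hφ]; simp⟩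
        refine (pvPB_iff P x (x, y)).2 ⟨fun e => hyx e.symm, hgw, by show pvIdx P x ≠ pvIdx P y; omega, ?_⟩
        rw [if_pos (show pvIdx P (x, y).1 > pvIdx P (x, y).2 by show pvIdx P x > pvIdx P y; omega)]
      · have hgw' : pvG P y x > pvG P x y := by omega
        have hmemE : (y, x) ∈ E :=
          (hE _).2 (pvG_pos_mem P y x (lt_of_le_of_lt (pvG_nonneg P x y) hgw'))
        refine List.mem_map.2 ⟨(y, x), List.mem_filter.2 ⟨hmemE, ?_⟩, by rw [hφ]; simp [hyx]⟩
        refine (pvPB_iff P x (y, x)).2 ⟨hyx, hgw', by show pvIdx P y ≠ pvIdx P x; omega, ?_⟩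
        rw [if_neg (show ¬ pvIdx P (y, x).1 > pvIdx P (y, x).2 by show ¬ pvIdx P y > pvIdx P x; omega)]
  have hperm := (List.perm_ext_iff_of_nodup hMnd (hL.filter _)).2 hmemM
  rw [List.countP_eq_length_filter, List.countP_eq_length_filter]
  rw [← List.length_map (f := φ) (as := E.filter (pvPB P x))]
  exact hperm.length_eq

-- under Pre_, every parsed gift endpoint is a (deduplicated) friend
theorem pvPre_mem (_friends : List String) (gifts : List String)
    (hPre : Pre_solution _friends gifts) :
    ∀ p ∈ pvPairs gifts, p.1 ∈ PySem.List.dedup _friends ∧ p.2 ∈ PySem.List.dedup _friends := by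
  intro p hp
  rcases List.mem_filterMap.1 hp with ⟨g, hg, hsp⟩
  rcases hPre.2 g hg with ⟨q, hq, hq1, hq2⟩
  rw [hq] at hsp
  cases hsp
  constructor
  · exact (PySem.List.mem_dedup _friends p.1).2 hq1
  · exact (PySem.List.mem_dedup _friends p.2).2 hq2

theorem pvB_main (_friends : List String) (gifts : List String)
    (hPre : Pre_solution _friends gifts) :
    solution_alt _friends gifts = pvAns (pvPairs gifts) (PySem.List.dedup _friends) := by
  simp only [solution_alt]
  rw [pvB1 gifts (PySem.Dict.empty, PySem.Dict.empty)]
  rw [show ∀ (x : PySem.Dict (String × String) Int) (y : PySem.Dict String Int), (x, y).1 = x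
    from fun _ _ => rfl]
  rw [show ∀ (x : PySem.Dict (String × String) Int) (y : PySem.Dict String Int), (x, y).2 = y
    from fun _ _ => rfl]
  rw [pvGive_eq_counter]
  rw [show (pvPairs gifts).foldl pvStepScore PySem.Dict.empty = pvScoreD (pvPairs gifts) from rfl]
  set P := pvPairs gifts with hP
  set L := PySem.List.dedup _friends with hL
  have hnodupL : L.Nodup := by
    rw [hL, PySem.List.dedup_eq_ofList]
    exact PySem.Set.nodup_ofList _friends
  have hPmem : ∀ p ∈ P, p.1 ∈ L ∧ p.2 ∈ L := pvPre_mem _friends gifts hPre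
  set scD := L.foldl (fun d n => d.insert n ((pvScoreD P).getD n 0)) PySem.Dict.empty with hscD
  have hscKeys : scD.keys = L := by
    rw [hscD, PySem.Dict.keys_foldl_insert L (fun _ n => (pvScoreD P).getD n 0) PySem.Dict.empty]
    show PySem.Set.update (PySem.Dict.empty : PySem.Dict String Int).keys L = L
    rw [show (PySem.Dict.empty : PySem.Dict String Int).keys = [] from rfl,
      PySem.Set.update_nil_left]
    rw [hL, PySem.List.dedup_eq_ofList]
    exact PySem.Set.ofList_ofList _friends
  have hscNd : scD.keys.Nodup := by rw [hscKeys]; exact hnodupL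
  have hscGet : ∀ x ∈ L, scD.getD x 0 = pvIdx P x := by
    intro x hx
    have h1 := pvFunFold_getD (fun n => (pvScoreD P).getD n 0) 0 L PySem.Dict.empty x
    rw [if_pos hx] at h1
    exact h1.trans (pvScoreD_getD P x)
  have hscVals : scD.values = L.map (pvIdx P) := by
    rw [PySem.Dict.values_eq_map_keys scD hscNd 0, hscKeys]
    exact List.map_congr_left (fun x hx => hscGet x hx)
  set vals := PySem.List.sorted scD.values (fun x => x) false with hvals
  have hvperm : vals.Perm (L.map (pvIdx P)) := by
    rw [hvals, hscVals]
    exact PySem.List.sorted_perm _ _ _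
  have hvpair : vals.Pairwise (· ≤ ·) := by
    rw [hvals]
    exact PySem.List.sorted_pairwise _ _
  set belowD := (PySem.List.enumerate vals 0).foldl
      (fun d iv => if d.contains iv.2 then d else d.insert iv.2 iv.1) PySem.Dict.empty with hbe
  have hbelow : ∀ x ∈ L, belowD.getD (scD.getD x 0) 0
      = (L.countP (fun y => decide (pvIdx P y < pvIdx P x)) : Int) := by
    intro x hx
    have hmemv : scD.getD x 0 ∈ vals := by
      rw [hvals, PySem.List.mem_sorted, hscVals, hscGet x hx]
      exact List.mem_map.2 ⟨x, hx, rfl⟩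
    have hce : (PySem.Dict.empty : PySem.Dict Int Int).contains (scD.getD x 0) = false :=
      PySem.Dict.contains_empty _
    have h := pvBelow_getD vals hvpair 0 PySem.Dict.empty (scD.getD x 0) hce hmemv
    have hcnt : vals.countP (fun w => decide (w < scD.getD x 0))
        = L.countP (fun y => decide (pvIdx P y < pvIdx P x)) := by
      rw [hvperm.countP_eq, List.countP_map]
      apply List.countP_congr
      intro y hy
      show (decide (pvIdx P y < scD.getD x 0) = true) ↔ (decide (pvIdx P y < pvIdx P x) = true)
      rw [hscGet x hx]
    rw [hbe]
    refine Eq.trans ?_ (by rw [← hcnt])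
    refine h.trans ?_
    simp
  set pts0 := L.foldl (fun d n => d.insert n (belowD.getD (scD.getD n 0) 0)) PySem.Dict.empty with hpts0
  have hpts0Keys : pts0.keys = L := by
    rw [hpts0, PySem.Dict.keys_foldl_insert L (fun _ n => belowD.getD (scD.getD n 0) 0) PySem.Dict.empty]
    show PySem.Set.update (PySem.Dict.empty : PySem.Dict String Int).keys L = L
    rw [show (PySem.Dict.empty : PySem.Dict String Int).keys = [] from rfl,
      PySem.Set.update_nil_left]
    rw [hL, PySem.List.dedup_eq_ofList]
    exact PySem.Set.ofList_ofList _friends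
  have hpts0Get : ∀ x ∈ L, pts0.getD x 0
      = (L.countP (fun y => decide (pvIdx P y < pvIdx P x)) : Int) := by
    intro x hx
    have h1 := pvFunFold_getD (fun n => belowD.getD (scD.getD n 0) 0) 0 L PySem.Dict.empty x
    rw [if_pos hx] at h1
    exact h1.trans (hbelow x hx)
  set E := (PySem.Dict.counter P).keys with hEdef
  have hEmem : ∀ p : String × String, p ∈ E ↔ p ∈ P := by
    intro p
    rw [hEdef, PySem.Dict.keys_counter]
    exact PySem.Set.mem_ofList P p
  have hEnd : E.Nodup := by rw [hEdef]; exact PySem.Dict.nodup_keys_counter P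
  have hbody : ∀ (acc : PySem.Dict String Int) (ab : String × String), ab ∈ E →
      (if ab.1 != ab.2 && decide ((PySem.Dict.counter P).getD ab 0 > (PySem.Dict.counter P).getD (ab.2, ab.1) 0) then
        let d1 := acc.insert ab.1 (acc.getD ab.1 0 + 1)
        if scD.getD ab.1 0 != scD.getD ab.2 0 then
          let w := if scD.getD ab.1 0 > scD.getD ab.2 0 then ab.1 else ab.2
          d1.insert w (d1.getD w 0 - 1)
        else d1
      else acc) = pvCStep P acc ab := by
    intro acc ab hab
    have habL := hPmem ab ((hEmem ab).1 hab)
    have hg1 : (PySem.Dict.counter P).getD ab 0 = pvG P ab.1 ab.2 := by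
      rw [PySem.Dict.getD_counter]
      unfold pvG
      rw [Prod.mk.eta]
    have hg2 : (PySem.Dict.counter P).getD (ab.2, ab.1) 0 = pvG P ab.2 ab.1 := by
      rw [PySem.Dict.getD_counter]
      rfl
    rw [hg1, hg2, hscGet ab.1 habL.1, hscGet ab.2 habL.2]
    rfl
  rw [PySem.List.foldl_congr_mem E _ (pvCStep P) pts0 hbody]
  obtain ⟨hfk, hfv⟩ := pvCFold P E pts0 (fun ab hab => by
    rw [hpts0Keys]
    exact hPmem ab ((hEmem ab).1 hab))
  have hfnd : (E.foldl (pvCStep P) pts0).keys.Nodup := by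
    rw [hfk, hpts0Keys]; exact hnodupL
  rw [PySem.Dict.values_eq_map_keys _ hfnd 0, hfk, hpts0Keys]
  have hmapc : L.map (fun x => (E.foldl (pvCStep P) pts0).getD x 0) = L.map (pvF P L) := by
    apply List.map_congr_left
    intro x hx
    rw [hfv x, hpts0Get x hx, pvDeltaSum P x E,
      pvCountA P L E hEmem hEnd hnodupL hPmem x, pvCountB P L E hEmem hEnd hnodupL hPmem x]
    have hsplit := pvCountSplit P x L
    unfold pvF
    omega
  rw [hmapc]
  rfl

-- ===== A-side lemmas =====

-- fold of constant-value inserts: lookups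
theorem pvConstFold_getD {ν : Type} (c dflt : ν) :
    ∀ (fr : List String) (d : PySem.Dict String ν) (x : String),
      (fr.foldl (fun d n => d.insert n c) d).getD x dflt
        = if x ∈ fr then c else d.getD x dflt := by
  intro fr
  induction fr with
  | nil => intro d x; simp
  | cons n t ih =>
    intro d x
    simp only [List.foldl_cons, ih, PySem.Dict.getD_insert, List.mem_cons]
    by_cases h1 : x ∈ t <;> by_cases h2 : x = n <;> simp [h1, h2]

def pvStepA (d : PySem.Dict String PvFriend) (pr : String × String) : PySem.Dict String PvFriend :=
  let gv := d.getD pr.1 pvFriend0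
  let d1 := d.insert pr.1 { gv with give := gv.give.modify pr.2 0 (· + 1) }
  let ge := d1.getD pr.2 pvFriend0
  d1.insert pr.2 { ge with got := ge.got + 1 }

theorem pvA1fold : ∀ (gifts : List String) (init : PySem.Dict String PvFriend),
    gifts.foldl (fun d gift => (pvSplitPair gift).elim d (fun pr => pvStepA d pr)) init
      = (pvPairs gifts).foldl pvStepA init := by
  intro gifts
  induction gifts with
  | nil => intro init; rfl
  | cons g t ih =>
    intro init
    cases h : pvSplitPair g with
    | none =>
      have hp : pvPairs (g :: t) = pvPairs t := by simp [pvPairs, h]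
      rw [hp]
      simp only [List.foldl_cons, h, Option.elim_none]
      exact ih init
    | some pr =>
      have hp : pvPairs (g :: t) = pr :: pvPairs t := by simp [pvPairs, h]
      rw [hp]
      simp only [List.foldl_cons, h, Option.elim_some]
      exact ih _

theorem pvStepA_getD (d : PySem.Dict String PvFriend) (pr : String × String) (x : String) :
    (pvStepA d pr).getD x pvFriend0 =
      { give := if x = pr.1 then (d.getD x pvFriend0).give.modify pr.2 0 (· + 1)
                else (d.getD x pvFriend0).give,
        got := if x = pr.2 then (d.getD x pvFriend0).got + 1 else (d.getD x pvFriend0).got,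
        should := (d.getD x pvFriend0).should } := by
  unfold pvStepA
  simp only [PySem.Dict.getD_insert]
  by_cases h2 : x = pr.2 <;> by_cases h1 : x = pr.1
  · have h3 : pr.2 = pr.1 := h2.symm.trans h1
    simp [h1, h3]
  · have h3 : ¬ pr.2 = pr.1 := fun e => h1 (h2.trans e)
    simp [h2, h3]
  · have h3 : ¬ pr.1 = pr.2 := fun e => h2 (h1.trans e)
    simp [h1, h3]
  · simp [h1, h2]

theorem pvStepA_keys (d : PySem.Dict String PvFriend) (pr : String × String)
    (h1 : pr.1 ∈ d.keys) (h2 : pr.2 ∈ d.keys) : (pvStepA d pr).keys = d.keys := by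
  unfold pvStepA
  have c1 : d.contains pr.1 = true := (PySem.Dict.contains_iff_mem_keys d pr.1).2 h1
  have c2 : (d.insert pr.1 { d.getD pr.1 pvFriend0 with
      give := (d.getD pr.1 pvFriend0).give.modify pr.2 0 (· + 1) }).contains pr.2 = true := by
    rw [PySem.Dict.contains_insert]
    rw [(PySem.Dict.contains_iff_mem_keys d pr.2).2 h2]
    simp
  rw [PySem.Dict.keys_insert_of_contains _ _ c2, PySem.Dict.keys_insert_of_contains _ _ c1]

theorem pvA1 (P : List (String × String)) :
    ∀ (d : PySem.Dict String PvFriend),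
    (∀ p ∈ P, p.1 ∈ d.keys ∧ p.2 ∈ d.keys) →
    (∀ x, (d.getD x pvFriend0).give.keys.Nodup) →
    ((P.foldl pvStepA d).keys = d.keys ∧
     (∀ x, ((P.foldl pvStepA d).getD x pvFriend0).give.keys.Nodup) ∧
     (∀ x y, ((P.foldl pvStepA d).getD x pvFriend0).give.getD y 0
        = (d.getD x pvFriend0).give.getD y 0 + (P.count (x, y) : Int)) ∧
     (∀ x, ((P.foldl pvStepA d).getD x pvFriend0).give.values.sum
        = (d.getD x pvFriend0).give.values.sum + (P.countP (fun p => p.1 == x) : Int)) ∧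
     (∀ x, ((P.foldl pvStepA d).getD x pvFriend0).got
        = (d.getD x pvFriend0).got + (P.countP (fun p => p.2 == x) : Int)) ∧
     (∀ x, ((P.foldl pvStepA d).getD x pvFriend0).should = (d.getD x pvFriend0).should)) := by
  induction P with
  | nil => intro d _ hnd; refine ⟨rfl, hnd, fun x y => by simp, fun x => by simp,
      fun x => by simp, fun x => by simp⟩
  | cons pr t ih =>
    intro d hmem hnd
    have hpr := hmem pr (List.mem_cons_self ..)
    have hk1 : (pvStepA d pr).keys = d.keys := pvStepA_keys d pr hpr.1 hpr.2
    have hmem' : ∀ p ∈ t, p.1 ∈ (pvStepA d pr).keys ∧ p.2 ∈ (pvStepA d pr).keys := by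
      intro p hp
      rw [hk1]
      exact hmem p (List.mem_cons_of_mem _ hp)
    have hnd' : ∀ x, ((pvStepA d pr).getD x pvFriend0).give.keys.Nodup := by
      intro x
      rw [pvStepA_getD]
      by_cases h : x = pr.1
      · simp only [h]
        show ((d.getD pr.1 pvFriend0).give.modify pr.2 0 (· + 1)).keys.Nodup
        exact PySem.Dict.nodup_keys_insert _ _ _ (hnd pr.1)
      · simp only [if_neg h]
        show (d.getD x pvFriend0).give.keys.Nodup
        exact hnd x
    obtain ⟨ik, ind, igv, isum, igot, ish⟩ := ih (pvStepA d pr) hmem' hnd'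
    rw [List.foldl_cons]
    refine ⟨ik.trans hk1, ind, ?_, ?_, ?_, ?_⟩
    · intro x y
      rw [igv x y, pvStepA_getD, List.count_cons]
      by_cases h1 : x = pr.1
      · rw [if_pos h1, PySem.Dict.getD_modify]
        by_cases h2 : y = pr.2
        · subst h2
          have hb : (pr == (x, pr.2)) = true := by
            rw [beq_iff_eq, h1]
          rw [if_pos rfl, hb]
          simp
          omega
        · have hb : (pr == (x, y)) = false := by
            simp only [beq_eq_false_iff_ne, ne_eq]
            exact fun e => h2 (by rw [e])
          rw [if_neg h2, hb]
          simp
      · have hb : (pr == (x, y)) = false := by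
          simp only [beq_eq_false_iff_ne, ne_eq]
          exact fun e => h1 (by rw [e])
        rw [if_neg h1, hb]
        simp
    · intro x
      rw [isum x, pvStepA_getD, List.countP_cons]
      by_cases h1 : x = pr.1
      · rw [if_pos h1, pvSum_values_modify _ _ (hnd x)]
        have hb : (pr.1 == x) = true := by rw [beq_iff_eq, h1]
        rw [hb]
        simp
        omega
      · have hb : (pr.1 == x) = false := by
          simp only [beq_eq_false_iff_ne, ne_eq]
          exact fun e => h1 e.symm
        rw [if_neg h1, hb]
        simp
    · intro x
      rw [igot x, pvStepA_getD, List.countP_cons]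
      by_cases h2 : x = pr.2
      · have hb : (pr.2 == x) = true := by rw [beq_iff_eq, h2]
        rw [if_pos h2, hb]
        simp
        omega
      · have hb : (pr.2 == x) = false := by
          simp only [beq_eq_false_iff_ne, ne_eq]
          exact fun e => h2 e.symm
        rw [if_neg h2, hb]
        simp
    · intro x
      rw [ish x, pvStepA_getD]

-- the decision A takes, phrased on a fixed snapshot D0 of the friends dict
def pvWinD (D0 : PySem.Dict String PvFriend) (an bn : String) : Bool :=
  decide ((D0.getD an pvFriend0).give.getD bn 0 > (D0.getD bn pvFriend0).give.getD an 0)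
  || (((D0.getD an pvFriend0).give.getD bn 0 == (D0.getD bn pvFriend0).give.getD an 0)
      && decide ((D0.getD an pvFriend0).give.values.sum - (D0.getD an pvFriend0).got
          > (D0.getD bn pvFriend0).give.values.sum - (D0.getD bn pvFriend0).got))

-- the zeta-reduced inner-loop body of A's pair loop
def pvBodyA (an : String) (d : PySem.Dict String PvFriend) (bn : String) :
    PySem.Dict String PvFriend :=
  if an == bn then d
  else if (d.getD an pvFriend0).give.getD bn 0 < (d.getD bn pvFriend0).give.getD an 0 then d
  else if (d.getD an pvFriend0).give.getD bn 0 > (d.getD bn pvFriend0).give.getD an 0 then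
    d.insert an { d.getD an pvFriend0 with should := (d.getD an pvFriend0).should + 1 }
  else if (d.getD an pvFriend0).give.values.sum - (d.getD an pvFriend0).got
      > (d.getD bn pvFriend0).give.values.sum - (d.getD bn pvFriend0).got then
    d.insert an { d.getD an pvFriend0 with should := (d.getD an pvFriend0).should + 1 }
  else d

theorem pvBodyA_facts (D0 d : PySem.Dict String PvFriend) (an bn : String)
    (hg : ∀ x, (d.getD x pvFriend0).give = (D0.getD x pvFriend0).give)
    (ht : ∀ x, (d.getD x pvFriend0).got = (D0.getD x pvFriend0).got)
    (han : an ∈ d.keys) :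
    (pvBodyA an d bn).keys = d.keys ∧
    ∀ x, (pvBodyA an d bn).getD x pvFriend0 =
      { d.getD x pvFriend0 with should := (d.getD x pvFriend0).should
          + (if x = an ∧ (bn != an && pvWinD D0 an bn) = true then 1 else 0) } := by
  unfold pvBodyA
  rw [hg an, hg bn, ht an, ht bn]
  have hins : ∀ v, (d.insert an v).keys = d.keys := fun v =>
    PySem.Dict.keys_insert_of_contains d v ((PySem.Dict.contains_iff_mem_keys d an).2 han)
  by_cases heq : an = bn
  · subst heq
    simp only [beq_self_eq_true, if_true]
    refine ⟨by trivial, fun x => ?_⟩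
    simp
  · have hbeq : (an == bn) = false := by simp [heq]
    have hbne : (bn != an) = true := by simp [bne_iff_ne]; exact fun e => heq e.symm
    rw [hbeq]
    simp only [Bool.false_eq_true, if_false, hbne, Bool.true_and]
    unfold pvWinD
    by_cases hlt : (D0.getD an pvFriend0).give.getD bn 0 < (D0.getD bn pvFriend0).give.getD an 0
    · have hw : (decide ((D0.getD an pvFriend0).give.getD bn 0 > (D0.getD bn pvFriend0).give.getD an 0)
          || (((D0.getD an pvFriend0).give.getD bn 0 == (D0.getD bn pvFriend0).give.getD an 0)
              && decide ((D0.getD an pvFriend0).give.values.sum - (D0.getD an pvFriend0).got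
                  > (D0.getD bn pvFriend0).give.values.sum - (D0.getD bn pvFriend0).got))) = false := by
        simp only [Bool.or_eq_false_iff, Bool.and_eq_false_iff, decide_eq_false_iff_not,
          beq_eq_false_iff_ne, ne_eq]
        exact ⟨by omega, Or.inl (by omega)⟩
      rw [if_pos hlt, hw]
      refine ⟨rfl, fun x => ?_⟩
      simp
    · rw [if_neg hlt]
      by_cases hgt : (D0.getD an pvFriend0).give.getD bn 0 > (D0.getD bn pvFriend0).give.getD an 0
      · have hw : (decide ((D0.getD an pvFriend0).give.getD bn 0 > (D0.getD bn pvFriend0).give.getD an 0)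
            || (((D0.getD an pvFriend0).give.getD bn 0 == (D0.getD bn pvFriend0).give.getD an 0)
                && decide ((D0.getD an pvFriend0).give.values.sum - (D0.getD an pvFriend0).got
                    > (D0.getD bn pvFriend0).give.values.sum - (D0.getD bn pvFriend0).got))) = true := by
          simp only [Bool.or_eq_true_iff, decide_eq_true_eq]
          exact Or.inl hgt
        rw [if_pos hgt, hw]
        refine ⟨hins _, fun x => ?_⟩
        rw [PySem.Dict.getD_insert]
        by_cases hx : x = an
        · simp [hx]
        · simp [hx]
      · rw [if_neg hgt]
        have hEq : (D0.getD an pvFriend0).give.getD bn 0 = (D0.getD bn pvFriend0).give.getD an 0 := by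
          omega
        by_cases hidx : (D0.getD an pvFriend0).give.values.sum - (D0.getD an pvFriend0).got
            > (D0.getD bn pvFriend0).give.values.sum - (D0.getD bn pvFriend0).got
        · have hw : (decide ((D0.getD an pvFriend0).give.getD bn 0 > (D0.getD bn pvFriend0).give.getD an 0)
              || (((D0.getD an pvFriend0).give.getD bn 0 == (D0.getD bn pvFriend0).give.getD an 0)
                  && decide ((D0.getD an pvFriend0).give.values.sum - (D0.getD an pvFriend0).got
                      > (D0.getD bn pvFriend0).give.values.sum - (D0.getD bn pvFriend0).got))) = true := by
            simp only [Bool.or_eq_true_iff, Bool.and_eq_true_iff, decide_eq_true_eq, beq_iff_eq]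
            exact Or.inr ⟨hEq, hidx⟩
          rw [if_pos hidx, hw]
          refine ⟨hins _, fun x => ?_⟩
          rw [PySem.Dict.getD_insert]
          by_cases hx : x = an
          · simp [hx]
          · simp [hx]
        · have hw : (decide ((D0.getD an pvFriend0).give.getD bn 0 > (D0.getD bn pvFriend0).give.getD an 0)
              || (((D0.getD an pvFriend0).give.getD bn 0 == (D0.getD bn pvFriend0).give.getD an 0)
                  && decide ((D0.getD an pvFriend0).give.values.sum - (D0.getD an pvFriend0).got
                      > (D0.getD bn pvFriend0).give.values.sum - (D0.getD bn pvFriend0).got))) = false := by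
            simp only [Bool.or_eq_false_iff, Bool.and_eq_false_iff, decide_eq_false_iff_not,
              beq_eq_false_iff_ne, ne_eq]
            exact ⟨by omega, Or.inr (by omega)⟩
          rw [if_neg hidx, hw]
          refine ⟨rfl, fun x => ?_⟩
          simp

theorem pvInnerA (D0 : PySem.Dict String PvFriend) (an : String) :
    ∀ (ys : List String) (d : PySem.Dict String PvFriend),
    (∀ x, (d.getD x pvFriend0).give = (D0.getD x pvFriend0).give) →
    (∀ x, (d.getD x pvFriend0).got = (D0.getD x pvFriend0).got) →
    an ∈ d.keys →
    ((ys.foldl (pvBodyA an) d).keys = d.keys ∧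
     (∀ x, ((ys.foldl (pvBodyA an) d).getD x pvFriend0).give = (D0.getD x pvFriend0).give) ∧
     (∀ x, ((ys.foldl (pvBodyA an) d).getD x pvFriend0).got = (D0.getD x pvFriend0).got) ∧
     (∀ x, ((ys.foldl (pvBodyA an) d).getD x pvFriend0).should
        = (d.getD x pvFriend0).should
          + (if x = an then (ys.countP (fun bn => bn != an && pvWinD D0 an bn) : Int) else 0))) := by
  intro ys
  induction ys with
  | nil => intro d hg ht _; exact ⟨rfl, hg, ht, fun x => by simp⟩
  | cons bn ys' ih =>
    intro d hg ht han
    obtain ⟨bk, bv⟩ := pvBodyA_facts D0 d an bn hg ht han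
    have hg' : ∀ x, ((pvBodyA an d bn).getD x pvFriend0).give = (D0.getD x pvFriend0).give := by
      intro x; rw [bv x]; exact hg x
    have ht' : ∀ x, ((pvBodyA an d bn).getD x pvFriend0).got = (D0.getD x pvFriend0).got := by
      intro x; rw [bv x]; exact ht x
    obtain ⟨ik, igv, igt, ish⟩ := ih (pvBodyA an d bn) hg' ht' (bk ▸ han)
    rw [List.foldl_cons]
    refine ⟨ik.trans bk, igv, igt, fun x => ?_⟩
    rw [ish x, bv x, List.countP_cons]
    by_cases hx : x = an
    · subst hx
      simp only [true_and]
      by_cases hw : (bn != x && pvWinD D0 x bn) = true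
      · simp [hw]; omega
      · have hw' : (bn != x && pvWinD D0 x bn) = false := by
          revert hw; cases (bn != x && pvWinD D0 x bn) <;> simp
        simp [hw']
    · simp [hx]

theorem pvOuterA (D0 : PySem.Dict String PvFriend) (K : List String) :
    ∀ (os : List String) (d : PySem.Dict String PvFriend),
    (∀ a ∈ os, a ∈ d.keys) →
    (∀ x, (d.getD x pvFriend0).give = (D0.getD x pvFriend0).give) →
    (∀ x, (d.getD x pvFriend0).got = (D0.getD x pvFriend0).got) →
    os.Nodup →
    ((os.foldl (fun d an => K.foldl (pvBodyA an) d) d).keys = d.keys ∧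
     ∀ x, ((os.foldl (fun d an => K.foldl (pvBodyA an) d) d).getD x pvFriend0).should
        = (d.getD x pvFriend0).should
          + (if x ∈ os then (K.countP (fun bn => bn != x && pvWinD D0 x bn) : Int) else 0)) := by
  intro os
  induction os with
  | nil => intro d _ _ _ _; exact ⟨rfl, fun x => by simp⟩
  | cons an os' ih =>
    intro d hmem hg ht hnd
    rcases List.nodup_cons.1 hnd with ⟨hano, hnd'⟩
    have han : an ∈ d.keys := hmem an (List.mem_cons_self ..)
    obtain ⟨ik1, ig1, it1, is1⟩ := pvInnerA D0 an K d hg ht han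
    have hmem' : ∀ a ∈ os', a ∈ (K.foldl (pvBodyA an) d).keys := fun a ha =>
      ik1 ▸ hmem a (List.mem_cons_of_mem _ ha)
    obtain ⟨ok, ov⟩ := ih (K.foldl (pvBodyA an) d) hmem' ig1 it1 hnd'
    rw [List.foldl_cons]
    refine ⟨ok.trans ik1, fun x => ?_⟩
    rw [ov x, is1 x]
    by_cases hx : x = an
    · subst hx
      have hxo : x ∉ os' := hano
      simp [hxo]
    · by_cases hxo : x ∈ os'
      · simp [hx, hxo]
      · have : x ∉ an :: os' := by simp [hx, hxo]
        simp [hx, hxo, this]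

theorem pvA_main (_friends : List String) (gifts : List String)
    (hPre : Pre_solution _friends gifts) :
    solution _friends gifts = pvAns (pvPairs gifts) (PySem.List.dedup _friends) := by
  have h0 : solution _friends gifts
      = (PySem.List.max?
          (((gifts.foldl (fun d gift => (pvSplitPair gift).elim d (fun pr => pvStepA d pr))
              (_friends.foldl (fun d name => d.insert name pvFriend0) PySem.Dict.empty)).keys.foldl
            (fun d an =>
              (gifts.foldl (fun d gift => (pvSplitPair gift).elim d (fun pr => pvStepA d pr))
                (_friends.foldl (fun d name => d.insert name pvFriend0) PySem.Dict.empty)).keys.foldl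
                (pvBodyA an) d)
            (gifts.foldl (fun d gift => (pvSplitPair gift).elim d (fun pr => pvStepA d pr))
              (_friends.foldl (fun d name => d.insert name pvFriend0) PySem.Dict.empty))).values.map
            (fun f => f.should)) (fun x => x)).getD 0 := rfl
  rw [pvA1fold] at h0
  rw [h0]
  set P := pvPairs gifts with hP
  set L := PySem.List.dedup _friends with hL
  set F0 := _friends.foldl (fun d name => d.insert name pvFriend0) PySem.Dict.empty with hF0
  have hnodupL : L.Nodup := by
    rw [hL, PySem.List.dedup_eq_ofList]
    exact PySem.Set.nodup_ofList _friends
  have hkeys0 : F0.keys = L := by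
    rw [hF0, PySem.Dict.keys_foldl_insert _friends (fun _ _ => pvFriend0) PySem.Dict.empty]
    show PySem.Set.update PySem.Dict.empty.keys _friends = L
    rw [show (PySem.Dict.empty : PySem.Dict String PvFriend).keys = [] from rfl,
      PySem.Set.update_nil_left, hL, PySem.List.dedup_eq_ofList]
  have hgd0 : ∀ x, F0.getD x pvFriend0 = pvFriend0 := by
    intro x
    rw [hF0, pvConstFold_getD]
    split_ifs <;> simp [PySem.Dict.getD_empty]
  have hmem : ∀ p ∈ P, p.1 ∈ F0.keys ∧ p.2 ∈ F0.keys := by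
    intro p hp
    rw [hkeys0]
    exact pvPre_mem _friends gifts hPre p hp
  have hndgive : ∀ x, (F0.getD x pvFriend0).give.keys.Nodup := by
    intro x
    rw [hgd0 x]
    exact PySem.Dict.nodup_keys_empty
  obtain ⟨k1, nd1, gv1, sum1, got1, sh1⟩ := pvA1 P F0 hmem hndgive
  have hK : (P.foldl pvStepA F0).keys = L := k1.trans hkeys0
  rw [hK]
  have hwin : ∀ an bn, pvWinD (P.foldl pvStepA F0) an bn = pvWin P an bn := by
    intro an bn
    unfold pvWinD pvWin pvG pvIdx
    rw [gv1 an bn, gv1 bn an, sum1 an, sum1 bn, got1 an, got1 bn, hgd0 an, hgd0 bn]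
    simp [pvFriend0, PySem.Dict.getD_empty,
      show (PySem.Dict.empty : PySem.Dict String Int).values.sum = 0 from rfl]
  obtain ⟨ok, ov⟩ := pvOuterA (P.foldl pvStepA F0) L L (P.foldl pvStepA F0)
    (fun a ha => hK ▸ ha) (fun x => rfl) (fun x => rfl) hnodupL
  have hvnd : (L.foldl (fun d an => L.foldl (pvBodyA an) d) (P.foldl pvStepA F0)).keys.Nodup := by
    rw [ok.trans hK]; exact hnodupL
  rw [PySem.Dict.values_eq_map_keys _ hvnd pvFriend0, ok.trans hK, List.map_map]
  have hmapc : L.map ((fun f => f.should) ∘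
        (fun k => (L.foldl (fun d an => L.foldl (pvBodyA an) d) (P.foldl pvStepA F0)).getD k pvFriend0))
      = L.map (pvF P L) := by
    apply List.map_congr_left
    intro x hx
    show ((L.foldl (fun d an => L.foldl (pvBodyA an) d) (P.foldl pvStepA F0)).getD x pvFriend0).should
        = pvF P L x
    rw [ov x, sh1 x, hgd0 x, if_pos hx]
    have hcnt : L.countP (fun bn => bn != x && pvWinD (P.foldl pvStepA F0) x bn)
        = L.countP (fun y => y != x && pvWin P x y) :=
      List.countP_congr (fun y _ => by rw [hwin x y])
    rw [hcnt]
    simp [pvF, pvFriend0]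
  rw [hmapc]
  rfl

-- ===== VERDICT (by name: the statement is the Claim_ definition above) =====
theorem solution_spec : Claim_equal_solution := by
  intro _friends gifts _ hPre
  show solution _friends gifts = solution_alt _friends gifts
  rw [pvA_main _friends gifts hPre, pvB_main _friends gifts hPre]
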